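-- pv_equiv track=rewrite | github.com/GrindelfP/unity_sphynx | code_finding.py | code_pick
-- ===== SOURCE A (Python) =====
-- def check_code(correct_code: str, current_code: list) -> bool:
--     is_fitting: bool = True
--     for i in range(len(correct_code)):
--         if correct_code[i] != str(current_code[i]):
--             is_fitting = False
--             break
--
--     return is_fitting
--
-- def code_pick(u_code) -> list:
--     code: list = []
--     for times in range(len(u_code)):
--         code.append(0)
--     for index in range(len(code)-1, -1, -1):
--         code[index] += 1
--         if check_code(u_code, code):
--             return code
-- ===== SOURCE B (Python) =====
-- def code_pick(u_code):
--     n = len(u_code)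
--     m = 0
--     while m < n and u_code[m] == "0":
--         m += 1
--     if m == n:
--         return None
--     for i in range(m, n):
--         if u_code[i] != "1":
--             return None
--     return [0] * m + [1] * (n - m)
-- ===== Notes on version B (the rewrite author's own statement) =====
-- stated objective: faster
-- what changed: Instead of generating each candidate 0^i 1^(n-i) and re-checking the whole string against it (quadratic), B does one left-to-right pass: count leading '0's, verify the rest are '1's, and return the closed-form list [0]*m + [1]*(n-m).
import Mathlib
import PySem

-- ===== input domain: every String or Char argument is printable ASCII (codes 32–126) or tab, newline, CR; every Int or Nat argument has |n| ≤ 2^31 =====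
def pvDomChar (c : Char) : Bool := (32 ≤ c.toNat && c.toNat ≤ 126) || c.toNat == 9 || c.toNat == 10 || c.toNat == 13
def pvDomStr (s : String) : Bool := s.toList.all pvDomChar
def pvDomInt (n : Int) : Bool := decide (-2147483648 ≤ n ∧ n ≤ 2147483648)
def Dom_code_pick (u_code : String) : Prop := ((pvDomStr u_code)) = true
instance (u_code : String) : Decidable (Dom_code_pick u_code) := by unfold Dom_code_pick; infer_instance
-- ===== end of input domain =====

-- B replaces A's quadratic generate-and-recheck loop over all suffix patterns by a
-- single left-to-right pass with a closed-form result (objective: faster, O(n^2) -> O(n)).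

-- ===== PORT A =====
-- helper check_code: flag-with-break loop comparing u_code[i] with str(code[i])
def check_code (cs : List Char) (vs : List Int) : Bool :=
  (List.range cs.length).foldl
    (fun fit i =>
      if fit = true then
        if String.ofList [cs.getD i ' '] ≠ PySem.Int.toStr (vs.getD i 0) then false else fit
      else fit) true

-- the second for-loop of code_pick: mutate code[index] += 1, early return on match
def code_pick_go (cs : List Char) : List Int → List Int → Option (List Int)
  | _code, [] => none
  | code, i :: rest =>
      let code' := code.set i.toNat (code.getD i.toNat 0 + 1)
      if check_code cs code' then some code' else code_pick_go cs code' rest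

def code_pick (u_code : String) : Option (List Int) :=
  let cs := u_code.toList
  let code := (List.range cs.length).foldl (fun c _ => c ++ [(0 : Int)]) []
  code_pick_go cs code (PySem.List.pyRange ((code.length : Int) - 1) (-1) (-1))

-- ===== PORT B =====
def code_pick_alt (u_code : String) : Option (List Int) :=
  let cs := u_code.toList
  let n := cs.length
  let m := (cs.takeWhile (fun c => c == '0')).length
  if m = n then none
  else if (cs.drop m).all (fun c => c == '1') then
    some (List.replicate m 0 ++ List.replicate (n - m) 1)
  else none

-- ===== PRECONDITION & SPEC =====
def Spec_code_pick (u_code : String) (out : Option (List Int)) : Prop := out = code_pick_alt u_code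
instance (u_code : String) (out : Option (List Int)) : Decidable (Spec_code_pick u_code out) := by unfold Spec_code_pick; infer_instance

-- ===== CLAIM (what is proved, stated in full; the proofs are below) =====
def Claim_equal_code_pick : Prop := ∀ (u_code : String), Dom_code_pick u_code → Spec_code_pick u_code (code_pick u_code)

-- ===== LEMMAS AND PROOFS =====

-- the int/char patterns A's loop walks through: i zeros then n-i ones
def pvPat (n i : Nat) : List Int := List.replicate i 0 ++ List.replicate (n - i) 1
def pvCPat (n i : Nat) : List Char := List.replicate i '0' ++ List.replicate (n - i) '1'

theorem foldl_append_replicate (k : Nat) (acc : List Int) :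
    (List.range k).foldl (fun c _ => c ++ [(0 : Int)]) acc = acc ++ List.replicate k 0 := by
  induction k generalizing acc with
  | zero => simp
  | succ k ih => simp [List.range_succ, List.foldl_append, ih, List.replicate_succ']

theorem foldl_break (P : Nat → Prop) [DecidablePred P] (l : List Nat) (b : Bool) :
    l.foldl (fun fit i => if fit = true then (if P i then false else fit) else fit) b
      = (b && l.all (fun i => decide ¬ P i)) := by
  induction l generalizing b with
  | nil => simp
  | cons x xs ih =>
      rw [List.foldl_cons, ih, List.all_cons]
      by_cases h : P x <;> cases b <;> simp [h]

theorem check_code_all (cs : List Char) (vs : List Int) :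
    check_code cs vs
      = (List.range cs.length).all
          (fun i => decide (String.ofList [cs.getD i ' '] = PySem.Int.toStr (vs.getD i 0))) := by
  unfold check_code
  rw [foldl_break (fun i => String.ofList [cs.getD i ' '] ≠ PySem.Int.toStr (vs.getD i 0))]
  simp

theorem pat_length (n i : Nat) (h : i ≤ n) : (pvPat n i).length = n := by
  simp [pvPat]; omega

theorem cpat_length (n i : Nat) (h : i ≤ n) : (pvCPat n i).length = n := by
  simp [pvCPat]; omega

theorem pat_getD (n i k : Nat) (hi : i ≤ n) (hk : k < n) :
    (pvPat n i).getD k 0 = if k < i then 0 else 1 := by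
  rw [List.getD_eq_getElem _ _ (by rw [pat_length n i hi]; omega)]
  unfold pvPat
  by_cases h : k < i
  · rw [List.getElem_append_left (by simpa using h)]; simp [h]
  · rw [List.getElem_append_right (by simpa using h)]; simp [h]

theorem cpat_getD (n i k : Nat) (hi : i ≤ n) (hk : k < n) :
    (pvCPat n i).getD k ' ' = if k < i then '0' else '1' := by
  rw [List.getD_eq_getElem _ _ (by rw [cpat_length n i hi]; omega)]
  unfold pvCPat
  by_cases h : k < i
  · rw [List.getElem_append_left (by simpa using h)]; simp [h]
  · rw [List.getElem_append_right (by simpa using h)]; simp [h]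

theorem list_eq_iff_getD (cs ds : List Char) (n : Nat) (h1 : cs.length = n)
    (h2 : ds.length = n) : cs = ds ↔ ∀ k < n, cs.getD k ' ' = ds.getD k ' ' := by
  constructor
  · rintro rfl; intro k _; rfl
  · intro H
    apply List.ext_getElem (by omega)
    intro k hk _
    have := H k (by omega)
    rwa [List.getD_eq_getElem _ _ (by omega), List.getD_eq_getElem _ _ (by omega)] at this

theorem ofList_eq_toStr_zero (c : Char) : String.ofList [c] = PySem.Int.toStr 0 ↔ c = '0' := by
  rw [show PySem.Int.toStr 0 = "0" from rfl]
  constructor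
  · intro h; have := congrArg String.toList h; simpa using this
  · rintro rfl; rfl

theorem ofList_eq_toStr_one (c : Char) : String.ofList [c] = PySem.Int.toStr 1 ↔ c = '1' := by
  rw [show PySem.Int.toStr 1 = "1" from rfl]
  constructor
  · intro h; have := congrArg String.toList h; simpa using this
  · rintro rfl; rfl

theorem check_code_pat (cs : List Char) (n i : Nat) (hn : cs.length = n) (hi : i ≤ n) :
    check_code cs (pvPat n i) = decide (cs = pvCPat n i) := by
  rw [check_code_all, hn, Bool.eq_iff_iff]
  simp only [List.all_eq_true, List.mem_range, decide_eq_true_eq]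
  rw [list_eq_iff_getD cs (pvCPat n i) n hn (cpat_length n i hi)]
  constructor
  · intro H k hk
    have h1 := H k hk
    rw [pat_getD n i k hi hk] at h1
    rw [cpat_getD n i k hi hk]
    by_cases h : k < i
    · rw [if_pos h] at h1 ⊢; exact (ofList_eq_toStr_zero _).1 h1
    · rw [if_neg h] at h1 ⊢; exact (ofList_eq_toStr_one _).1 h1
  · intro H k hk
    have h1 := H k hk
    rw [cpat_getD n i k hi hk] at h1
    rw [pat_getD n i k hi hk]
    by_cases h : k < i
    · rw [if_pos h] at h1 ⊢; exact (ofList_eq_toStr_zero _).2 h1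
    · rw [if_neg h] at h1 ⊢; exact (ofList_eq_toStr_one _).2 h1

theorem drop_len_takeWhile (p : Char → Bool) (l : List Char) :
    l.drop (List.takeWhile p l).length = List.dropWhile p l := by
  induction l with
  | nil => simp
  | cons a t ih => by_cases h : p a <;> simp [h, ih]

-- cs = 0^j 1^(n-j) (with j < n) iff the leading-zero count is j and the rest is all ones
theorem cs_eq_cpat_iff (cs : List Char) (n j : Nat) (hn : cs.length = n) (_hj : j < n) :
    cs = pvCPat n j ↔
      ((cs.takeWhile (fun c => c == '0')).length = j ∧
        (cs.drop (cs.takeWhile (fun c => c == '0')).length).all (fun c => c == '1')) := by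
  constructor
  · rintro rfl
    have htw : (pvCPat n j).takeWhile (fun c => c == '0') = List.replicate j '0' := by
      unfold pvCPat
      rw [List.takeWhile_append]
      simp
    refine ⟨by rw [htw]; simp, ?_⟩
    rw [htw, List.length_replicate]
    unfold pvCPat
    rw [List.drop_append_of_le_length (by simp)]
    simp
  · rintro ⟨h1, h2⟩
    have htw : cs.takeWhile (fun c => c == '0') = List.replicate j '0' := by
      have h3 := (List.eq_replicate_length (l := cs.takeWhile (fun c => c == '0')) (a := '0')).mpr
        (fun b hb => by simpa using List.mem_takeWhile_imp hb)
      rw [h1] at h3; exact h3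
    have hdw : cs.drop j = List.replicate (n - j) '1' := by
      have hlen : (cs.drop j).length = n - j := by simp [hn]
      rw [h1] at h2
      have h3 := (List.eq_replicate_length (l := cs.drop j) (a := '1')).mpr
        (fun b hb => by simpa using List.all_eq_true.mp h2 b hb)
      rw [hlen] at h3; exact h3
    have := List.takeWhile_append_dropWhile (p := fun c => c == '0') (l := cs)
    rw [← drop_len_takeWhile (fun c => c == '0') cs, h1] at this
    rw [← this, htw, hdw]; rfl

theorem set_mid (j : Nat) (t : List Int) :
    (List.replicate (j+1) 0 ++ t).set j 1 = List.replicate j 0 ++ 1 :: t := by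
  induction j with
  | zero => simp
  | succ j ih => simpa [List.replicate_succ] using ih

theorem set_pat (n j : Nat) (h : j < n) :
    (pvPat n (j+1)).set j ((pvPat n (j+1)).getD j 0 + 1) = pvPat n j := by
  rw [pat_getD n (j+1) j (by omega) h, if_pos (by omega)]
  show (pvPat n (j+1)).set j 1 = pvPat n j
  unfold pvPat
  rw [set_mid]
  congr 1
  rw [show n - j = (n - (j+1)) + 1 by omega, List.replicate_succ]

theorem loop_spec (cs : List Char) (n : Nat) (hn : cs.length = n) :
    ∀ j, j ≤ n →
      code_pick_go cs (pvPat n j) (PySem.List.pyRange ((j : Int) - 1) (-1) (-1))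
        = if (cs.takeWhile (fun c => c == '0')).length < j ∧
              (cs.drop (cs.takeWhile (fun c => c == '0')).length).all (fun c => c == '1')
          then some (pvPat n (cs.takeWhile (fun c => c == '0')).length)
          else none := by
  intro j
  induction j with
  | zero =>
      intro _
      rw [show ((0:Nat) : Int) - 1 = -1 by norm_num,
        PySem.List.pyRange_neg_one_eq_nil (by norm_num)]
      simp [code_pick_go]
  | succ j ih =>
      intro hj
      have hj' : j < n := by omega
      rw [show (((j+1 : Nat)) : Int) - 1 = (j : Int) by push_cast; ring]
      rw [PySem.List.pyRange_neg_one_cons (by omega)]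
      simp only [code_pick_go]
      rw [show ((j : Int)).toNat = j from Int.toNat_natCast j]
      rw [set_pat n j hj']
      rw [check_code_pat cs n j hn (le_of_lt hj')]
      by_cases hcs : cs = pvCPat n j
      · rw [if_pos (by simpa using hcs)]
        have hmj := (cs_eq_cpat_iff cs n j hn hj').1 hcs
        rw [if_pos ⟨by omega, hmj.2⟩, hmj.1]
      · rw [if_neg (by simpa using hcs)]
        rw [show (j : Int) = ((j : Nat) : Int) from rfl]
        rw [ih (by omega)]
        have hne := (not_iff_not.mpr (cs_eq_cpat_iff cs n j hn hj')).1 hcs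
        by_cases hc : (cs.takeWhile (fun c => c == '0')).length < j ∧
            (cs.drop (cs.takeWhile (fun c => c == '0')).length).all (fun c => c == '1')
        · rw [if_pos hc, if_pos ⟨by omega, hc.2⟩]
        · rw [if_neg hc]
          rw [if_neg (by
            rintro ⟨ha, hb⟩
            rcases Nat.lt_succ_iff_lt_or_eq.mp ha with h | h
            · exact hc ⟨h, hb⟩
            · exact hne ⟨h, hb⟩)]

theorem code_pick_eq_alt (u : String) : code_pick u = code_pick_alt u := by
  unfold code_pick code_pick_alt
  dsimp only
  set cs := u.toList with hcs
  set n := cs.length with hn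
  set m := (cs.takeWhile (fun c => c == '0')).length with hm
  have hmn : m ≤ n := by rw [hm, hn]; exact (List.takeWhile_prefix _).length_le
  rw [foldl_append_replicate]
  rw [show ([] ++ List.replicate n (0:Int)) = pvPat n n by simp [pvPat]]
  rw [show ((pvPat n n).length : Int) = (n : Int) by rw [pat_length n n le_rfl]]
  rw [loop_spec cs n rfl n le_rfl]
  by_cases h1 : m = n
  · rw [if_neg (by omega), if_pos h1]
  · rw [if_neg h1]
    by_cases h2 : (cs.drop m).all (fun c => c == '1')
    · rw [if_pos ⟨by omega, h2⟩, if_pos h2]; rfl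
    · rw [if_neg (fun hh => h2 hh.2), if_neg h2]

-- ===== VERDICT (by name: the statement is the Claim_ definition above) =====
theorem code_pick_spec : Claim_equal_code_pick := by
  intro u _
  unfold Spec_code_pick
  exact code_pick_eq_alt u
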